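-- pv_equiv track=rewrite | github.com/rfxct/computational-thinking-with-python | 2024-08-20-matrizes/tabuleiro-xadrez.py | tabuleiro_xadrez
-- ===== SOURCE A (Python) =====
-- def tabuleiro_xadrez(tamanho):
--     matriz = []
--
--     for lin in range(tamanho):
--         linha = []
--
--         for col in range(tamanho):
--             linha.append('x' if (col + lin) % 2 else '.')
--         matriz.append(linha)
--
--     return matriz
-- ===== SOURCE B (Python) =====
-- def tabuleiro_xadrez(tamanho):
--     even_row = list(('.x' * tamanho)[:tamanho])
--     odd_row = list(('x.' * tamanho)[:tamanho])
--     return [list(even_row if lin % 2 == 0 else odd_row) for lin in range(tamanho)]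
-- ===== Notes on version B (the rewrite author's own statement) =====
-- stated objective: simpler
-- what changed: B precomputes the two row patterns once via string repetition and slicing and builds the board by selecting and copying a template per row, instead of A's nested loop computing per-cell parity.
import Mathlib
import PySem

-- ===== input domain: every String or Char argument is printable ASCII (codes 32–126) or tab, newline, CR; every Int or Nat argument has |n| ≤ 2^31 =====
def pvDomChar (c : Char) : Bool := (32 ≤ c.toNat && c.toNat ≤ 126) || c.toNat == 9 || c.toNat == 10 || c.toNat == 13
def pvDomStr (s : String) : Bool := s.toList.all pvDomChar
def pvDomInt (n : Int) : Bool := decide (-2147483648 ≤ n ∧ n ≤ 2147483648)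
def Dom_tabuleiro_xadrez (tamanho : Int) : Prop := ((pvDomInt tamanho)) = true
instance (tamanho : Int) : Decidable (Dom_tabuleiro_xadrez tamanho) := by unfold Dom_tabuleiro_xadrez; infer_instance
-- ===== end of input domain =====

-- B precomputes the two row templates once (string repetition + slice) and selects a template per row,
-- replacing A's per-cell parity loop; objective: simpler. Return-value equivalence only (no mutation involved).


-- ===== PORT A =====
-- literal port: nested loops appending 'x'/'.' by per-cell parity
def tabuleiro_xadrez (tamanho : Int) : List (List String) :=
  (PySem.List.pyRange 0 tamanho 1).foldl
    (fun matriz lin =>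
      matriz ++ [(PySem.List.pyRange 0 tamanho 1).foldl
        (fun linha col =>
          linha ++ [if PySem.Int.mod (col + lin) 2 ≠ 0 then "x" else "."])
        []])
    []

-- ===== PORT B =====
-- list(('.x' * tamanho)[:tamanho]) : repeat the 2-char pattern, slice to length, split into 1-char strings
def pvRowTemplate (pat : List Char) (tamanho : Int) : List String :=
  (((List.replicate tamanho.toNat pat).flatten.take tamanho.toNat).map (fun c => String.ofList [c]))

def tabuleiro_xadrez_alt (tamanho : Int) : List (List String) :=
  let even_row := pvRowTemplate ['.', 'x'] tamanho
  let odd_row := pvRowTemplate ['x', '.'] tamanho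
  (PySem.List.pyRange 0 tamanho 1).map
    (fun lin => if PySem.Int.mod lin 2 == 0 then even_row else odd_row)

-- ===== PRECONDITION & SPEC =====
def Spec_tabuleiro_xadrez (tamanho : Int) (out : List (List String)) : Prop := out = tabuleiro_xadrez_alt tamanho
instance (tamanho : Int) (out : List (List String)) : Decidable (Spec_tabuleiro_xadrez tamanho out) := by unfold Spec_tabuleiro_xadrez; infer_instance

-- ===== CLAIM (what is proved, stated in full; the proofs are below) =====
def Claim_equal_tabuleiro_xadrez : Prop := ∀ (tamanho : Int), Dom_tabuleiro_xadrez tamanho → Spec_tabuleiro_xadrez tamanho (tabuleiro_xadrez tamanho)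

-- ===== LEMMAS AND PROOFS =====

-- foldl push-append is map
theorem pv_foldl_push {α β : Type} (f : α → β) (l : List α) (acc : List β) :
    l.foldl (fun a x => a ++ [f x]) acc = acc ++ l.map f := by
  induction l generalizing acc with
  | nil => simp
  | cons x xs ih => simp [List.foldl, ih, List.append_assoc]

-- element of the repeated two-char pattern is decided by parity
theorem pv_flatten_replicate_pair_getElem {α : Type} (a b : α) :
    ∀ (n i : Nat) (h : i < ((List.replicate n [a, b]).flatten).length),
      ((List.replicate n [a, b]).flatten)[i] = if i % 2 = 0 then a else b := by
  intro n
  induction n with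
  | zero => intro i h; simp at h
  | succ m ih =>
    intro i h
    have hL : (List.replicate (m + 1) [a, b]).flatten =
        a :: b :: (List.replicate m [a, b]).flatten := by
      simp [List.replicate_succ]
    match i with
    | 0 => simp [hL]
    | 1 => simp [hL]
    | (j + 2) =>
      have hlen : j + 2 < ((List.replicate (m + 1) [a, b]).flatten).length := h
      have h' : j < ((List.replicate m [a, b]).flatten).length := by
        simp only [List.length_flatten] at hlen ⊢
        simp [List.replicate_succ] at hlen ⊢
        omega
      have hj : (j + 2) % 2 = j % 2 := by omega
      simp only [hL, List.getElem_cons_succ]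
      rw [ih j h', hj]

theorem pv_template_eq (a b : Char) (n : Nat) :
    ((List.replicate n [a, b]).flatten.take n).map (fun c => String.ofList [c]) =
      (List.range n).map (fun k => if k % 2 = 0 then String.ofList [a] else String.ofList [b]) := by
  apply List.ext_getElem
  · simp
    omega
  · intro i h1 h2
    have hlen : ((List.replicate n [a, b]).flatten).length = 2 * n := by
      simp [Nat.mul_comm]
    have hi : i < n := by simpa using h2
    have hif : i < ((List.replicate n [a, b]).flatten).length := by omega
    simp only [List.getElem_map, List.getElem_take, List.getElem_range]
    rw [pv_flatten_replicate_pair_getElem a b n i hif]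
    split_ifs <;> rfl

-- Python mod (col+lin) % 2 as Nat parity
theorem pv_mod_cast (c l : Nat) :
    PySem.Int.mod ((c : Int) + (l : Int)) 2 = (((c + l) % 2 : Nat) : Int) := by
  rw [PySem.Int.mod_eq_emod_of_pos (by norm_num)]
  push_cast
  omega

theorem pv_range_cast (t : Int) :
    PySem.List.pyRange 0 t 1 = (List.range t.toNat).map (fun k => ((k : Nat) : Int)) := by
  rw [PySem.List.pyRange_one]
  simp

-- ===== VERDICT (by name: the statement is the Claim_ definition above) =====
theorem tabuleiro_xadrez_spec : Claim_equal_tabuleiro_xadrez := by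
  intro tamanho _
  unfold Spec_tabuleiro_xadrez tabuleiro_xadrez tabuleiro_xadrez_alt
  rw [pv_foldl_push, List.nil_append, pv_range_cast, List.map_map, List.map_map]
  apply List.map_congr_left
  intro lin _
  simp only [Function.comp]
  rw [pv_foldl_push, List.nil_append, List.map_map]
  have hmod : PySem.Int.mod ((lin : Nat) : Int) 2 = (((lin % 2 : Nat)) : Int) := by
    simpa using pv_mod_cast lin 0
  by_cases hpar : lin % 2 = 0
  · rw [hmod, hpar]
    simp only [Int.natCast_zero, beq_self_eq_true, if_true]
    unfold pvRowTemplate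
    rw [pv_template_eq]
    apply List.map_congr_left
    intro col _
    simp only [Function.comp]
    rw [pv_mod_cast]
    have h2 : (col + lin) % 2 = col % 2 := by omega
    rw [h2]
    by_cases hc : col % 2 = 0
    · simp only [hc]; decide
    · have hc1 : col % 2 = 1 := by omega
      simp only [hc1]; decide
  · have h1 : lin % 2 = 1 := by omega
    rw [hmod, h1]
    simp only [Int.natCast_one]
    rw [if_neg (by decide)]
    unfold pvRowTemplate
    rw [pv_template_eq]
    apply List.map_congr_left
    intro col _
    simp only [Function.comp]
    rw [pv_mod_cast]
    by_cases hc : col % 2 = 0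
    · have h2 : (col + lin) % 2 = 1 := by omega
      rw [h2]
      simp only [hc]; decide
    · have hc1 : col % 2 = 1 := by omega
      have h2 : (col + lin) % 2 = 0 := by omega
      rw [h2]
      simp only [hc1]; decide
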